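-- pv_equiv track=rewrite | github.com/baschni/21norm | helper.py | get_left_white_space
-- ===== SOURCE A (Python) =====
-- def get_left_white_space(line):
-- 	tabs = 0
-- 	non_tabs = 0
-- 	for c in line:
-- 		if c == "\t":
-- 			tabs += 1
-- 		elif c.isspace():
-- 			non_tabs += 1
-- 		else:
-- 			return (tabs, non_tabs)
-- 	return (tabs, non_tabs)
-- ===== SOURCE B (Python) =====
-- import itertools
--
-- def get_left_white_space(line):
--     prefix = ''.join(itertools.takewhile(str.isspace, line))
--     tabs = prefix.count('\t')
--     return (tabs, len(prefix) - tabs)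
-- ===== Notes on version B (the rewrite author's own statement) =====
-- stated objective: simpler
-- what changed: Replaces the classifying early-return loop with extract-the-whitespace-prefix (takewhile isspace) then count tabs and derive non-tabs as prefix length minus tabs.
import Mathlib
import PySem

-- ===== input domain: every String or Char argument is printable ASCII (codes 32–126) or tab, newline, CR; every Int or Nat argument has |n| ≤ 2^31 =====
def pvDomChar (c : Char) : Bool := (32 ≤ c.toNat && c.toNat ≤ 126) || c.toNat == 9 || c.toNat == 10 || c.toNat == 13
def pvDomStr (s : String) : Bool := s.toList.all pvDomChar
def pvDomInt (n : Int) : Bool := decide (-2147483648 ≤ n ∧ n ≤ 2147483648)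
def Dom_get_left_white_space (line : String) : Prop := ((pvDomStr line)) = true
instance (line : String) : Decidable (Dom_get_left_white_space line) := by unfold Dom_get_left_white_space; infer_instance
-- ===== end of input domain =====

-- B replaces A's classifying early-return loop by extracting the leading whitespace prefix and counting tabs in it (objective: simpler).

-- ===== PORT A =====
-- the for-loop over the characters with the two accumulators and the early return
def getLwsLoop : List Char → Int → Int → Int × Int
  | [], tabs, non_tabs => (tabs, non_tabs)
  | c :: cs, tabs, non_tabs =>
    if c = '\t' then getLwsLoop cs (tabs + 1) non_tabs
    else if PySem.Chars.isspace c then getLwsLoop cs tabs (non_tabs + 1)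
    else (tabs, non_tabs)

def get_left_white_space (line : String) : Int × Int :=
  getLwsLoop line.toList 0 0

-- ===== PORT B =====
def get_left_white_space_alt (line : String) : Int × Int :=
  let pre := line.toList.takeWhile PySem.Chars.isspace  -- ''.join(itertools.takewhile(str.isspace, line))
  let tabs : Int := pre.count '\t'                      -- prefix.count('\t')
  (tabs, (pre.length : Int) - tabs)                     -- (tabs, len(prefix) - tabs)

-- ===== PRECONDITION & SPEC =====
def Spec_get_left_white_space (line : String) (out : Int × Int) : Prop := out = get_left_white_space_alt line
instance (line : String) (out : Int × Int) : Decidable (Spec_get_left_white_space line out) := by unfold Spec_get_left_white_space; infer_instance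

-- ===== CLAIM (what is proved, stated in full; the proofs are below) =====
def Claim_equal_get_left_white_space : Prop := ∀ (line : String), Dom_get_left_white_space line → Spec_get_left_white_space line (get_left_white_space line)

-- ===== LEMMAS AND PROOFS =====
theorem getLwsLoop_eq (cs : List Char) : ∀ (tabs non_tabs : Int),
    getLwsLoop cs tabs non_tabs =
      (tabs + ((cs.takeWhile PySem.Chars.isspace).count '\t' : Int),
       non_tabs + ((cs.takeWhile PySem.Chars.isspace).length : Int)
         - ((cs.takeWhile PySem.Chars.isspace).count '\t' : Int)) := by
  induction cs with
  | nil => intro tabs non_tabs; simp [getLwsLoop]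
  | cons c cs ih =>
    intro tabs non_tabs
    by_cases ht : c = '\t'
    · subst ht
      have hsp : PySem.Chars.isspace '\t' = true := by decide
      simp [getLwsLoop, hsp, ih]
      constructor <;> ring
    · by_cases hsp : PySem.Chars.isspace c = true
      · simp [getLwsLoop, ht, hsp, ih]
        ring
      · simp at hsp
        simp [getLwsLoop, ht, hsp]

-- ===== VERDICT (by name: the statement is the Claim_ definition above) =====
theorem get_left_white_space_spec : Claim_equal_get_left_white_space := by
  intro line _
  show _ = _
  simp [get_left_white_space, get_left_white_space_alt, getLwsLoop_eq]
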